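-- pv_equiv track=rewrite | github.com/degoleiv/Ejercicios-Python | mayusculas.py | upper
-- ===== SOURCE A (Python) =====
-- def upper(str1):
--
--     str_upperlist = []
--     for char in str1:
--         ascii_code = ord(char)
--
--         if 97 <= ascii_code <= 122:
--             if ascii_code != 32:
--                 ascii_code -= 32
--
--
--         str_upperlist.append(chr(ascii_code))
--     # # Join all the hex values into a single string
--     str_upper = "".join(str_upperlist)
--     return str_upper
-- ===== SOURCE B (Python) =====
-- def upper(str1):
--     # 26 whole-string passes: globally replace each lowercase letter by its
--     # uppercase counterpart; replacements are disjoint and never produce a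
--     # character a later pass touches.
--     for code in range(97, 123):
--         str1 = str1.replace(chr(code), chr(code - 32))
--     return str1
-- ===== Notes on version B (the rewrite author's own statement) =====
-- stated objective: faster
-- what changed: Replaces A's per-character ord/branch/append scan with 26 staged whole-string replace passes, one per lowercase letter (str1.replace(chr(c), chr(c-32)) for c in 97..122); correct because each pass only produces uppercase letters no later pass matches.
import Mathlib
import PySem

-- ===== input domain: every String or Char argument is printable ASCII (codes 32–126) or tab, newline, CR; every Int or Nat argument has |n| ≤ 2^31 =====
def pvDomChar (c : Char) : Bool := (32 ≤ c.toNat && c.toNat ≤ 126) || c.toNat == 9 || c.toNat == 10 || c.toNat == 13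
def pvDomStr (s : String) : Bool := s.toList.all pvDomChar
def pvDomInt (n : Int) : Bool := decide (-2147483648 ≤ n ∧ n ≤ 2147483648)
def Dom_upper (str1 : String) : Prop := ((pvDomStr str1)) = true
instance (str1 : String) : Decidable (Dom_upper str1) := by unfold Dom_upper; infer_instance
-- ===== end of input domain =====

-- B replaces A's per-character scan by 26 staged whole-string replace passes
-- (one per lowercase letter), measured faster in Python by a constant factor.

-- ===== PORT A =====
-- per-character loop: ord, range test, redundant ≠32 test, chr, append; join at the end
def upper (str1 : String) : String :=
  let lst := str1.toList.foldl (fun acc ch =>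
    let a := ch.toNat
    let a := if 97 ≤ a ∧ a ≤ 122 then (if a ≠ 32 then a - 32 else a) else a
    acc ++ [Char.ofNat a]) []
  String.ofList lst

-- ===== PORT B =====
-- for code in range(97, 123): str1 = str1.replace(chr(code), chr(code - 32))
def upper_alt (str1 : String) : String :=
  (PySem.List.pyRange 97 123 1).foldl (fun s code =>
    PySem.Str.replace s (String.ofList [Char.ofNat code.toNat])
                        (String.ofList [Char.ofNat (code - 32).toNat])) str1

-- ===== PRECONDITION & SPEC =====
def Spec_upper (str1 : String) (out : String) : Prop := out = upper_alt str1
instance (str1 : String) (out : String) : Decidable (Spec_upper str1 out) := by unfold Spec_upper; infer_instance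

-- ===== CLAIM (what is proved, stated in full; the proofs are below) =====
def Claim_equal_upper : Prop := ∀ (str1 : String), Dom_upper str1 → Spec_upper str1 (upper str1)

-- ===== LEMMAS AND PROOFS =====

-- A's append-accumulator loop is a map
theorem foldl_append_singleton_eq_map (g : Char → Char) :
    ∀ (l : List Char) (acc : List Char),
      l.foldl (fun acc ch => acc ++ [g ch]) acc = acc ++ l.map g := by
  intro l
  induction l with
  | nil => simp
  | cons c t ih => intro acc; simp [List.foldl, ih]

-- single-character replace is a character-wise map
theorem replace_single_eq_map (c d : Char) :
    ∀ (fuel : Nat) (l acc : List Char), l.length ≤ fuel →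
      PySem.Chars.replace.go [c] [d] fuel l acc
        = acc.reverse ++ l.map (fun x => if x = c then d else x) := by
  intro fuel
  induction fuel with
  | zero =>
    intro l acc h
    have : l = [] := List.eq_nil_of_length_eq_zero (Nat.le_zero.mp h)
    subst this; simp [PySem.Chars.replace.go]
  | succ n ih =>
    intro l acc h
    cases l with
    | nil => simp [PySem.Chars.replace.go]
    | cons x t =>
      simp only [PySem.Chars.replace.go]
      by_cases hx : x = c
      · subst hx
        have hp : List.isPrefixOf [x] (x :: t) = true := by
          simp [List.isPrefixOf]
        rw [if_pos hp]
        have := ih t ([d].reverse ++ acc) (by simpa using Nat.le_of_succ_le_succ h)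
        simpa [this]
      · have hp : List.isPrefixOf [c] (x :: t) = false := by
          simp only [List.isPrefixOf, Bool.and_true,
            beq_eq_false_iff_ne, ne_eq]
          exact fun h' => hx h'.symm
        rw [if_neg (by simp [hp])]
        have := ih t (x :: acc) (by simpa using Nat.le_of_succ_le_succ h)
        simpa [this, hx]

theorem replace_single (c d : Char) (l : List Char) :
    PySem.Chars.replace l [c] [d] = l.map (fun x => if x = c then d else x) := by
  simpa [PySem.Chars.replace] using replace_single_eq_map c d l.length l [] (le_refl _)

-- folding single-character replaces over a code list is one map of the folded substitution
theorem fold_replace_eq_map :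
    ∀ (codes : List Int) (l : List Char),
      codes.foldl (fun s code =>
          PySem.Chars.replace s [Char.ofNat code.toNat] [Char.ofNat (code - 32).toNat]) l
        = l.map (fun ch => codes.foldl (fun x code =>
            if x = Char.ofNat code.toNat then Char.ofNat (code - 32).toNat else x) ch) := by
  intro codes
  induction codes with
  | nil => intro l; simp
  | cons c t ih =>
    intro l
    simp only [List.foldl_cons]
    rw [replace_single, ih, List.map_map]
    rfl

-- pointwise agreement of the two character transforms on the domain's code points
set_option maxRecDepth 10000 in
set_option maxHeartbeats 2000000 in
theorem upper_char_eq : ∀ n : Nat, n < 127 →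
    (PySem.List.pyRange 97 123 1).foldl (fun x code =>
        if x = Char.ofNat code.toNat then Char.ofNat (code - 32).toNat else x) (Char.ofNat n)
      = Char.ofNat (if 97 ≤ n ∧ n ≤ 122 then (if n ≠ 32 then n - 32 else n) else n) := by
  decide

-- String-level B fold moves to the list level
theorem upper_alt_toList (str1 : String) :
    (upper_alt str1).toList
      = (PySem.List.pyRange 97 123 1).foldl (fun s code =>
          PySem.Chars.replace s [Char.ofNat code.toNat] [Char.ofNat (code - 32).toNat])
          str1.toList := by
  unfold upper_alt
  generalize PySem.List.pyRange 97 123 1 = codes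
  induction codes generalizing str1 with
  | nil => rfl
  | cons c t ih =>
    simp only [List.foldl_cons]
    rw [ih]
    have h : (PySem.Str.replace str1 (String.ofList [Char.ofNat c.toNat])
          (String.ofList [Char.ofNat (c - 32).toNat])).toList
        = PySem.Chars.replace str1.toList [Char.ofNat c.toNat]
            [Char.ofNat (c - 32).toNat] := by
      rw [PySem.Str.toList_replace, String.toList_ofList, String.toList_ofList]
    rw [h]

-- ===== VERDICT (by name: the statement is the Claim_ definition above) =====
theorem upper_spec : Claim_equal_upper := by
  intro str1 hdom
  unfold Spec_upper
  apply String.ext  -- wrapper; real goal is on toList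
  rw [upper_alt_toList, fold_replace_eq_map]
  unfold upper
  simp only
  rw [foldl_append_singleton_eq_map
      (fun ch => Char.ofNat (if 97 ≤ ch.toNat ∧ ch.toNat ≤ 122 then
        (if ch.toNat ≠ 32 then ch.toNat - 32 else ch.toNat) else ch.toNat))]
  simp only [List.nil_append, String.toList_ofList]
  apply List.map_congr_left
  intro c hc
  have hd : pvDomChar c = true := (List.all_eq_true.mp hdom) c hc
  have hle : c.toNat < 127 := by simp [pvDomChar] at hd; omega
  obtain ⟨n, hn, rfl⟩ : ∃ n, n < 127 ∧ c = Char.ofNat n :=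
    ⟨c.toNat, hle, (Char.ofNat_toNat c).symm⟩
  have hv : (Char.ofNat n).toNat = n := by
    have : n.isValidChar := Or.inl (by omega)
    simp [Char.toNat_ofNat, this]
  rw [hv]
  exact (upper_char_eq n hn).symm
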